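-- pv_equiv track=rewrite | github.com/hucknz/generic-obd-ble | custom_components/generic_obd_ble/api.py | _decode_pid_supported
-- ===== SOURCE A (Python) =====
-- def _decode_pid_supported(data: list[int]) -> list[str]:
--     """Decode a PID support bitmap (4 data bytes) into supported PIDs."""
--     if len(data) < 4:
--         return []
--
--     supported: list[str] = []
--     for byte_index, byte_val in enumerate(data[:4]):
--         for bit in range(8):
--             if byte_val & (1 << (7 - bit)):
--                 pid_num = 1 + (byte_index * 8) + bit
--                 supported.append(f"{pid_num:02X}")
--     return supported
-- ===== SOURCE B (Python) =====
-- def _decode_pid_supported(data: list[int]) -> list[str]: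
--     """Decode a PID support bitmap (4 data bytes) into supported PIDs."""
--     if len(data) < 4:
--         return []
--     val = ((data[0] & 0xFF) << 24) | ((data[1] & 0xFF) << 16) | ((data[2] & 0xFF) << 8) | (data[3] & 0xFF)
--     return [f"{pid:02X}" for pid in range(1, 33) if val & (1 << (32 - pid))]
-- ===== Notes on version B (the rewrite author's own statement) =====
-- stated objective: simpler
-- what changed: Replaces the nested byte-then-bit loop with packing the four (byte-masked) bytes into one 32-bit integer and a single flat comprehension over PID numbers 1..32 testing the corresponding bit.
import Mathlib
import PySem

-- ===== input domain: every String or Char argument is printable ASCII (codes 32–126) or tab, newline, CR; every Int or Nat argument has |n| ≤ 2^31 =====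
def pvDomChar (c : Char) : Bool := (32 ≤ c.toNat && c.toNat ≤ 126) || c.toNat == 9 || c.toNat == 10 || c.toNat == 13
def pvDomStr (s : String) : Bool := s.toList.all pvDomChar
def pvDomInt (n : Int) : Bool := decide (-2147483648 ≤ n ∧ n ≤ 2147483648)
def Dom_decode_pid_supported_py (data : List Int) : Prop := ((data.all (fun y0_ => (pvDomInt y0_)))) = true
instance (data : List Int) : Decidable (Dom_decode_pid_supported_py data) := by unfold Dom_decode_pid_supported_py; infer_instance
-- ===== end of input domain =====

-- B replaces A's nested byte-then-bit loop with one packed 32-bit value and a single flat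
-- pass over PID numbers 1..32 (objective: simpler).

-- ===== PORT A =====
-- Port of f"{n:02X}" — exact for 0 <= n < 256 (both programs only format PID numbers 1..32).
def pvHexDig (n : Nat) : Char :=
  (['0','1','2','3','4','5','6','7','8','9','A','B','C','D','E','F']).getD n '0'

def pvHex02X (n : Int) : String := String.ofList [pvHexDig (n.toNat / 16), pvHexDig (n.toNat % 16)]

-- Literal transliteration of A: guard, enumerate over data[:4], inner bit loop, conditional append.
def decode_pid_supported_py (data : List Int) : List String :=
  if data.length < 4 then []
  else
    (PySem.List.enumerate (PySem.List.slice data none (some 4))).foldl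
      (fun supported p =>
        (PySem.List.pyRange 0 8 1).foldl
          (fun supported bit =>
            if PySem.Int.band p.2 ((1 : Int) <<< ((7 : Int) - bit).toNat) ≠ 0 then
              supported ++ [pvHex02X (1 + p.1 * 8 + bit)]
            else supported)
          supported)
      []

-- ===== PORT B =====
-- Literal transliteration of B: pack the four masked bytes into one 32-bit value,
-- then one flat comprehension over PID numbers 1..32 testing bit (32 - pid).
def decode_pid_supported_py_alt (data : List Int) : List String :=
  if data.length < 4 then []
  else
    let val : Int :=
      PySem.Int.bor (PySem.Int.bor (PySem.Int.bor
        ((PySem.Int.band (PySem.List.pyGetD data 0 0) 255) <<< (24 : Nat))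
        ((PySem.Int.band (PySem.List.pyGetD data 1 0) 255) <<< (16 : Nat)))
        ((PySem.Int.band (PySem.List.pyGetD data 2 0) 255) <<< (8 : Nat)))
        (PySem.Int.band (PySem.List.pyGetD data 3 0) 255)
    (PySem.List.pyRange 1 33 1).filterMap
      (fun pid =>
        if PySem.Int.band val ((1 : Int) <<< ((32 : Int) - pid).toNat) ≠ 0 then
          some (pvHex02X pid)
        else none)

-- ===== PRECONDITION & SPEC =====
def Spec_decode_pid_supported_py (data : List Int) (out : List String) : Prop := out = decode_pid_supported_py_alt data
instance (data : List Int) (out : List String) : Decidable (Spec_decode_pid_supported_py data out) := by unfold Spec_decode_pid_supported_py; infer_instance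

-- ===== CLAIM (what is proved, stated in full; the proofs are below) =====
def Claim_equal_decode_pid_supported_py : Prop := ∀ (data : List Int), Dom_decode_pid_supported_py data → Spec_decode_pid_supported_py data (decode_pid_supported_py data)

-- ===== LEMMAS AND PROOFS =====

def pvBit (d : Int) (t : Nat) : Bool :=
  if 0 ≤ d then d.toNat.testBit t else !((-d - 1).toNat.testBit t)

theorem pv_land_mod (m : Nat) : 2 ^ 8 - 1 &&& m = m % 2 ^ 8 :=
  Nat.eq_of_testBit_eq fun i => by
    rw [Nat.testBit_and, Nat.testBit_two_pow_sub_one, Nat.testBit_mod_two_pow, Bool.and_comm]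

theorem pv_band_two_pow (d : Int) (k : Nat) :
    (PySem.Int.band d ((1 : Int) <<< k) ≠ 0) ↔ pvBit d k = true := by
  have hpow : ((1 : Int) <<< k) = ((2 ^ k : Nat) : Int) := by
    rw [show ((1:Int) <<< k) = ((1 <<< k : Nat) : Int) from rfl, Nat.one_shiftLeft]
  rw [hpow]
  unfold PySem.Int.band pvBit
  by_cases hd : (0:Int) ≤ d
  · simp only [hd, if_true, if_pos (by positivity : (0:Int) ≤ ((2^k : Nat) : Int))]
    rw [Int.toNat_natCast, Nat.and_two_pow]
    rcases h : d.toNat.testBit k <;> simp [h] <;> omega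
  · simp only [hd, if_false, if_pos (by positivity : (0:Int) ≤ ((2^k : Nat) : Int))]
    rw [Int.toNat_natCast, Nat.and_comm, Nat.and_two_pow]
    have hpos : 0 < 2 ^ k := Nat.two_pow_pos k
    rcases h : (-d - 1).toNat.testBit k <;> simp [h] <;> omega

theorem pv_byte_nonneg (d : Int) : 0 ≤ PySem.Int.band d 255 := by
  rw [PySem.Int.band_comm]
  exact PySem.Int.band_nonneg_of_nonneg_left d (by norm_num)

theorem pv_byte_lt (d : Int) : (PySem.Int.band d 255).toNat < 256 := by
  unfold PySem.Int.band
  by_cases hd : (0:Int) ≤ d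
  · simp only [hd, if_true, if_pos (by norm_num : (0:Int) ≤ 255)]
    rw [Int.toNat_natCast]
    have : d.toNat &&& (255:Int).toNat ≤ (255:Int).toNat := Nat.and_le_right
    omega
  · simp only [hd, if_false, if_pos (by norm_num : (0:Int) ≤ 255)]
    rw [Int.toNat_natCast]
    omega

theorem pv_byte_testBit (d : Int) (t : Nat) (ht : t < 8) :
    (PySem.Int.band d 255).toNat.testBit t = pvBit d t := by
  have h255 : (255:Int).toNat = 2 ^ 8 - 1 := by decide
  unfold PySem.Int.band pvBit
  by_cases hd : (0:Int) ≤ d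
  · simp only [hd, if_true, if_pos (by norm_num : (0:Int) ≤ 255)]
    rw [Int.toNat_natCast, h255, Nat.and_comm, pv_land_mod, Nat.testBit_mod_two_pow]
    simp [ht]
  · simp only [hd, if_false, if_pos (by norm_num : (0:Int) ≤ 255)]
    rw [Int.toNat_natCast, h255, pv_land_mod]
    have hm : (-d - 1).toNat % 2 ^ 8 < 256 := Nat.mod_lt _ (by norm_num)
    have key : ∀ x < 256, ∀ i < 8, (2 ^ 8 - 1 - x).testBit i = !x.testBit i := by
      set_option maxRecDepth 8192 in decide
    rw [key _ hm t ht, Nat.testBit_mod_two_pow]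
    simp [ht]

theorem pv_hi_bit_false {n i : Nat} (hn : n < 256) (hi : 8 ≤ i) : n.testBit i = false := by
  have h : (256 : Nat) ≤ 2 ^ i :=
    le_trans (by norm_num : (256:Nat) ≤ 2 ^ 8) (Nat.pow_le_pow_right (by norm_num) hi)
  exact Nat.testBit_lt_two_pow (lt_of_lt_of_le hn h)

theorem pv_val_testBit (n0 n1 n2 n3 : Nat) (h1 : n1 < 256)
    (h2 : n2 < 256) (h3 : n3 < 256) (q t : Nat) (hq : q < 4) (ht : t < 8) :
    ((n0 <<< 24 ||| n1 <<< 16 ||| n2 <<< 8 ||| n3).testBit (8 * q + t))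
      = ([n3, n2, n1, n0].getD q 0).testBit t := by
  interval_cases q
  · simp [Nat.testBit_or, Nat.testBit_shiftLeft,
      show ¬(24 ≤ t) by omega, show ¬(16 ≤ t) by omega, show ¬(8 ≤ t) by omega]
  · simp [Nat.testBit_or, Nat.testBit_shiftLeft,
      show ¬(24 ≤ 8 * 1 + t) by omega, show ¬(16 ≤ 8 * 1 + t) by omega,
      show (8 ≤ 8 * 1 + t) by omega, show 8 * 1 + t - 8 = t by omega,
      pv_hi_bit_false h3 (show 8 ≤ 8 * 1 + t by omega)]
  · simp [Nat.testBit_or, Nat.testBit_shiftLeft,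
      show ¬(24 ≤ 8 * 2 + t) by omega, show (16 ≤ 8 * 2 + t) by omega,
      show (8 ≤ 8 * 2 + t) by omega, show 8 * 2 + t - 16 = t by omega,
      show 8 * 2 + t - 8 = 8 + t by omega,
      pv_hi_bit_false h3 (show 8 ≤ 8 * 2 + t by omega),
      pv_hi_bit_false h2 (show 8 ≤ 8 + t by omega)]
  · simp [Nat.testBit_or, Nat.testBit_shiftLeft,
      show (24 ≤ 8 * 3 + t) by omega, show (16 ≤ 8 * 3 + t) by omega,
      show (8 ≤ 8 * 3 + t) by omega, show 8 * 3 + t - 24 = t by omega,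
      show 8 * 3 + t - 16 = 8 + t by omega, show 8 * 3 + t - 8 = 16 + t by omega,
      pv_hi_bit_false h3 (show 8 ≤ 8 * 3 + t by omega),
      pv_hi_bit_false h1 (show 8 ≤ 8 + t by omega),
      pv_hi_bit_false h2 (show 8 ≤ 16 + t by omega)]

theorem pvBit_natCast (n : Nat) (k : Nat) : pvBit (n : Int) k = n.testBit k := by
  unfold pvBit; simp

theorem pv_foldl_filterMap {α β : Type} (p : α → Prop) [DecidablePred p] (f : α → β) :
    ∀ (l : List α) (acc : List β),
      l.foldl (fun a x => if p x then a ++ [f x] else a) acc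
        = acc ++ l.filterMap (fun x => if p x then some (f x) else none)
  | [], acc => by simp
  | x :: l, acc => by
    by_cases h : p x <;>
      simp [List.foldl_cons, h, pv_foldl_filterMap p f l]

def pvValN (d0 d1 d2 d3 : Int) : Nat :=
  (PySem.Int.band d0 255).toNat <<< 24 ||| (PySem.Int.band d1 255).toNat <<< 16 |||
    (PySem.Int.band d2 255).toNat <<< 8 ||| (PySem.Int.band d3 255).toNat

theorem pv_bor_shift (a b c d : Int) (ha : 0 ≤ a) (hb : 0 ≤ b) (hc : 0 ≤ c) (hd : 0 ≤ d) :
    PySem.Int.bor (PySem.Int.bor (PySem.Int.bor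
      (a <<< (24 : Nat)) (b <<< (16 : Nat))) (c <<< (8 : Nat))) d
    = ((a.toNat <<< 24 ||| b.toNat <<< 16 ||| c.toNat <<< 8 ||| d.toNat : Nat) : Int) := by
  lift a to Nat using ha
  lift b to Nat using hb
  lift c to Nat using hc
  lift d to Nat using hd
  simp only [← Int.natCast_shiftLeft, PySem.Int.bor_natCast, Int.toNat_natCast]

theorem pv_val_eq (d0 d1 d2 d3 : Int) :
    PySem.Int.bor (PySem.Int.bor (PySem.Int.bor
      ((PySem.Int.band d0 255) <<< (24 : Nat)) ((PySem.Int.band d1 255) <<< (16 : Nat)))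
      ((PySem.Int.band d2 255) <<< (8 : Nat))) (PySem.Int.band d3 255)
    = ((pvValN d0 d1 d2 d3 : Nat) : Int) :=
  pv_bor_shift _ _ _ _ (pv_byte_nonneg d0) (pv_byte_nonneg d1) (pv_byte_nonneg d2) (pv_byte_nonneg d3)


theorem pv_chunk (d0 d1 d2 d3 d e lo hi : Int) (j : Nat) (hj : j < 4)
    (hd : [(PySem.Int.band d3 255).toNat, (PySem.Int.band d2 255).toNat,
           (PySem.Int.band d1 255).toNat, (PySem.Int.band d0 255).toNat].getD (3 - j) 0
          = (PySem.Int.band d 255).toNat)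
    (he : e = (j : Int) * 8) (hlo : lo = 8 * (j : Int) + 1) (hhi : hi = 8 * (j : Int) + 9) :
    List.filterMap (fun x => if PySem.Int.band d ((1 : Int) <<< ((7 : Int) - x).toNat) ≠ 0
        then some (pvHex02X (1 + e + x)) else none) (PySem.List.pyRange 0 8 1)
    = List.filterMap (fun pid => if PySem.Int.band ((pvValN d0 d1 d2 d3 : Nat) : Int)
          ((1 : Int) <<< ((32 : Int) - pid).toNat) ≠ 0
        then some (pvHex02X pid) else none) (PySem.List.pyRange lo hi 1) := by
  subst he hlo hhi
  rw [PySem.List.pyRange_one 0 8, PySem.List.pyRange_one (8 * (j:Int) + 1) (8 * (j:Int) + 9),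
    show ((8:Int) - 0).toNat = 8 from by omega,
    show ((8 * (j:Int) + 9) - (8 * (j:Int) + 1)).toNat = 8 from by omega,
    List.filterMap_map, List.filterMap_map]
  apply List.filterMap_congr
  intro b hb
  have hblt : b < 8 := List.mem_range.mp hb
  simp only [Function.comp_apply]
  rw [show ((7:Int) - (0 + (b:Int))).toNat = 7 - b from by omega,
    show ((32:Int) - (8 * (j:Int) + 1 + (b:Int))).toNat = 8 * (3 - j) + (7 - b) from by omega]
  simp only [pv_band_two_pow, pvBit_natCast]
  rw [pvValN, pv_val_testBit _ _ _ _ (pv_byte_lt d1) (pv_byte_lt d2) (pv_byte_lt d3)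
      (3 - j) (7 - b) (by omega) (by omega)]
  rw [hd, pv_byte_testBit d (7 - b) (by omega)]
  rw [show (1 + (j:Int) * 8 + (0 + (b:Int))) = 8 * (j:Int) + 1 + (b:Int) from by ring]

-- ===== VERDICT (by name: the statement is the Claim_ definition above) =====
theorem decode_pid_supported_py_spec : Claim_equal_decode_pid_supported_py := by
  intro data _
  unfold Spec_decode_pid_supported_py
  unfold decode_pid_supported_py decode_pid_supported_py_alt
  by_cases hlen : data.length < 4
  · simp [hlen]
  · obtain ⟨d0, d1, d2, d3, rest, rfl⟩ :
        ∃ a b c d r, data = a :: b :: c :: d :: r := by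
      rcases data with _ | ⟨a, _ | ⟨b, _ | ⟨c, _ | ⟨d, r⟩⟩⟩⟩ <;>
        first
          | exact ⟨_, _, _, _, _, rfl⟩
          | (exfalso; apply hlen; simp)
    rw [if_neg hlen, if_neg hlen]
    rw [show PySem.List.slice (d0::d1::d2::d3::rest) none (some 4) = [d0,d1,d2,d3] from by
      rw [PySem.List.slice_to (xs := d0::d1::d2::d3::rest) (b := 4) (by norm_num)]; rfl]
    simp only [PySem.List.enumerate_cons, PySem.List.enumerate_nil]
    simp only [pv_foldl_filterMap]
    simp only [PySem.List.foldl_append_eq_flatMap]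
    simp only [List.flatMap_cons, List.flatMap_nil, List.append_nil, List.nil_append]
    simp only [show PySem.List.pyGetD (d0::d1::d2::d3::rest) 0 0 = d0 from by simp [PySem.List.pyGetD_ofNat'],
      show PySem.List.pyGetD (d0::d1::d2::d3::rest) 1 0 = d1 from by simp [PySem.List.pyGetD_ofNat'],
      show PySem.List.pyGetD (d0::d1::d2::d3::rest) 2 0 = d2 from by simp [PySem.List.pyGetD_ofNat'],
      show PySem.List.pyGetD (d0::d1::d2::d3::rest) 3 0 = d3 from by simp [PySem.List.pyGetD_ofNat']]
    rw [pv_val_eq d0 d1 d2 d3]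
    rw [show PySem.List.pyRange 1 33 1
        = PySem.List.pyRange 1 9 1 ++ (PySem.List.pyRange 9 17 1 ++ (PySem.List.pyRange 17 25 1
          ++ PySem.List.pyRange 25 33 1)) from by
      rw [← PySem.List.pyRange_one_append 17 25 33 (by norm_num) (by norm_num)]
      rw [← PySem.List.pyRange_one_append 9 17 33 (by norm_num) (by norm_num)]
      rw [← PySem.List.pyRange_one_append 1 9 33 (by norm_num) (by norm_num)]]
    simp only [List.filterMap_append]
    rw [pv_chunk d0 d1 d2 d3 d0 (0 * 8) 1 9 0 (by norm_num) rfl (by norm_num) (by norm_num) (by norm_num),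
      pv_chunk d0 d1 d2 d3 d1 ((0 + 1) * 8) 9 17 1 (by norm_num) rfl (by norm_num) (by norm_num) (by norm_num),
      pv_chunk d0 d1 d2 d3 d2 ((0 + 1 + 1) * 8) 17 25 2 (by norm_num) rfl (by norm_num) (by norm_num) (by norm_num),
      pv_chunk d0 d1 d2 d3 d3 ((0 + 1 + 1 + 1) * 8) 25 33 3 (by norm_num) rfl (by norm_num) (by norm_num) (by norm_num)]
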